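-- pv_equiv track=rewrite | github.com/yding25/Test | task-level/facts_from_townmap.py | sort_waypoints
-- ===== SOURCE A (Python) =====
-- def sort_waypoints(waypoints_list, road_id_list, lane_id_list):
--     # -----------------------------------------
--     # sort waypoints: road_id (from min to max), lane_id(from min to max)
--     # -----------------------------------------
--     waypoints_list_sorted = []
--     road_id_min = min(road_id_list)
--     road_id_max = max(road_id_list)
--     lane_id_min = min(lane_id_list)
--     lane_id_max = max(lane_id_list)
--     id_in_taskplanner = 1
--     for road_id in range(road_id_min, road_id_max + 1):
--         for lane_id in range(lane_id_min, lane_id_max + 1):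
--             signal_found = 0
--             for element in waypoints_list:
--                 if element[0] == road_id and element[1] == lane_id:
--                     signal_found = 1
--                     element.append(id_in_taskplanner)
--                     waypoints_list_sorted.append(element)
--             if signal_found == 1:
--                 id_in_taskplanner = id_in_taskplanner + 1
--     return waypoints_list_sorted
-- ===== SOURCE B (Python) =====
-- def sort_waypoints(waypoints_list, road_id_list, lane_id_list):
--     # Sort-then-scan: keep waypoints whose (road_id, lane_id) falls inside the
--     # id ranges, stably sort them by that key, then assign sequential ids in one
--     # pass, incrementing on every key change.  Like A, the assigned id is
--     # appended to each matched waypoint in place.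
--     road_id_min, road_id_max = min(road_id_list), max(road_id_list)
--     lane_id_min, lane_id_max = min(lane_id_list), max(lane_id_list)
--     keyed = [(element[0], element[1], element) for element in waypoints_list]
--     keyed = [t for t in keyed
--              if road_id_min <= t[0] <= road_id_max and lane_id_min <= t[1] <= lane_id_max]
--     keyed.sort(key=lambda t: (t[0], t[1]))
--     waypoints_list_sorted = []
--     prev_key = None
--     id_in_taskplanner = 0
--     for road_id, lane_id, element in keyed:
--         if (road_id, lane_id) != prev_key:
--             id_in_taskplanner += 1
--             prev_key = (road_id, lane_id)
--         element.append(id_in_taskplanner)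
--         waypoints_list_sorted.append(element)
--     return waypoints_list_sorted
-- ===== Notes on version B (the rewrite author's own statement) =====
-- stated objective: faster
-- what changed: B replaces A's triple loop (sweeping every (road_id, lane_id) grid cell and rescanning waypoints_list for each cell) by filtering the in-range waypoints, stably sorting them once by the (road_id, lane_id) key, and assigning ids in a single scan that increments on each key change.
-- outside the precondition, e.g. on sort_waypoints([[5]], [0], [0]): A returns [], B raises IndexError
import Mathlib
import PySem

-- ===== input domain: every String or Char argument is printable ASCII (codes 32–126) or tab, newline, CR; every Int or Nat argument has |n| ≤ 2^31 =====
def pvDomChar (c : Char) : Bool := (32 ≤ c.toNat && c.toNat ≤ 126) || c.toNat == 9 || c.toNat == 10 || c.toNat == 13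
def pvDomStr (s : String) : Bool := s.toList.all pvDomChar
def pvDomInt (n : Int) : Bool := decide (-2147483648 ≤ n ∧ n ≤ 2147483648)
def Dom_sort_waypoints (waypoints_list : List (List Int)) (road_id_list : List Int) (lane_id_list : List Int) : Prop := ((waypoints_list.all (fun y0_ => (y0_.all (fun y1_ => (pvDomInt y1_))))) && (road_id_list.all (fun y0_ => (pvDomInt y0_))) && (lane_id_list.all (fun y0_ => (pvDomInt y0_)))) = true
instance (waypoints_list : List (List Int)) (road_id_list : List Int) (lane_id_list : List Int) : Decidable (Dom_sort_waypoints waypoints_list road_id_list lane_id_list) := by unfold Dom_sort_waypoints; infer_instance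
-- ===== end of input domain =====

-- B replaces A's grid sweep (rescanning waypoints_list for every (road,lane) cell) by a
-- stable sort of the in-range waypoints by (road_id, lane_id) followed by one scan that
-- increments the assigned id on each key change (objective: faster). Both A and B mutate
-- the matched waypoints in place (appending the id); the equivalence proved is about the
-- RETURN value.

-- ===== PORT A =====
def sort_waypoints (waypoints_list : List (List Int)) (road_id_list : List Int) (lane_id_list : List Int) : List (List Int) :=
  let road_id_min := (PySem.List.min? road_id_list (fun x => x)).getD 0
  let road_id_max := (PySem.List.max? road_id_list (fun x => x)).getD 0
  let lane_id_min := (PySem.List.min? lane_id_list (fun x => x)).getD 0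
  let lane_id_max := (PySem.List.max? lane_id_list (fun x => x)).getD 0
  -- state: (waypoints_list_sorted, id_in_taskplanner); inner state: (signal_found, waypoints_list_sorted)
  let st := (PySem.List.pyRange road_id_min (road_id_max + 1) 1).foldl (fun st road_id =>
    (PySem.List.pyRange lane_id_min (lane_id_max + 1) 1).foldl (fun st lane_id =>
      let r := waypoints_list.foldl (fun (r : Int × List (List Int)) element =>
        if PySem.List.pyGetD element 0 0 = road_id ∧ PySem.List.pyGetD element 1 0 = lane_id then
          (1, r.2 ++ [element ++ [st.2]])
        else r) (0, st.1)
      if r.1 = 1 then (r.2, st.2 + 1) else (r.2, st.2)) st) (([] : List (List Int)), (1 : Int))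
  st.1

-- ===== PORT B =====
-- the tuple (element[0], element[1], element) Source B builds
def pvTriple (element : List Int) : Int × Int × List Int :=
  (PySem.List.pyGetD element 0 0, PySem.List.pyGetD element 1 0, element)

def sort_waypoints_alt (waypoints_list : List (List Int)) (road_id_list : List Int) (lane_id_list : List Int) : List (List Int) :=
  let road_id_min := (PySem.List.min? road_id_list (fun x => x)).getD 0
  let road_id_max := (PySem.List.max? road_id_list (fun x => x)).getD 0
  let lane_id_min := (PySem.List.min? lane_id_list (fun x => x)).getD 0
  let lane_id_max := (PySem.List.max? lane_id_list (fun x => x)).getD 0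
  let keyed := waypoints_list.map pvTriple
  let keyed := keyed.filter (fun t => decide (road_id_min ≤ t.1 ∧ t.1 ≤ road_id_max ∧
                                              lane_id_min ≤ t.2.1 ∧ t.2.1 ≤ lane_id_max))
  let keyed := PySem.List.sorted2 keyed (fun t => t.1) (fun t => t.2.1)
  -- scan state: (waypoints_list_sorted, prev_key, id_in_taskplanner)
  let st := keyed.foldl (fun (st : List (List Int) × Option (Int × Int) × Int) t =>
      if st.2.1 ≠ some (t.1, t.2.1) then
        (st.1 ++ [t.2.2 ++ [st.2.2 + 1]], some (t.1, t.2.1), st.2.2 + 1)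
      else
        (st.1 ++ [t.2.2 ++ [st.2.2]], st.2.1, st.2.2))
    (([] : List (List Int)), (none : Option (Int × Int)), (0 : Int))
  st.1

-- ===== PRECONDITION & SPEC =====
-- Pre_ excludes empty road/lane id lists (A raises ValueError on min) and waypoints with
-- fewer than 2 entries (A raises IndexError on most of them; on the rest — a short
-- waypoint whose road id falls outside the road range — A returns without ever reading
-- element[1], while B's key tuple reads it and raises IndexError).
def Pre_sort_waypoints (waypoints_list : List (List Int)) (road_id_list : List Int) (lane_id_list : List Int) : Prop :=
  road_id_list ≠ [] ∧ lane_id_list ≠ [] ∧ ∀ e ∈ waypoints_list, 2 ≤ e.length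
instance (waypoints_list : List (List Int)) (road_id_list : List Int) (lane_id_list : List Int) : Decidable (Pre_sort_waypoints waypoints_list road_id_list lane_id_list) := by unfold Pre_sort_waypoints; infer_instance

def pvWitness_sort_waypoints : List (List Int) × List Int × List Int :=
  ([[1, 0, 5], [0, 0, 7], [1, 0, 2]], [0, 1], [0])

def Spec_sort_waypoints (waypoints_list : List (List Int)) (road_id_list : List Int) (lane_id_list : List Int) (out : List (List Int)) : Prop := out = sort_waypoints_alt waypoints_list road_id_list lane_id_list
instance (waypoints_list : List (List Int)) (road_id_list : List Int) (lane_id_list : List Int) (out : List (List Int)) : Decidable (Spec_sort_waypoints waypoints_list road_id_list lane_id_list out) := by unfold Spec_sort_waypoints; infer_instance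

-- ===== CLAIM (what is proved, stated in full; the proofs are below) =====
def Claim_equal_sort_waypoints : Prop := ∀ (waypoints_list : List (List Int)) (road_id_list : List Int) (lane_id_list : List Int), Dom_sort_waypoints waypoints_list road_id_list lane_id_list → Pre_sort_waypoints waypoints_list road_id_list lane_id_list → Spec_sort_waypoints waypoints_list road_id_list lane_id_list (sort_waypoints waypoints_list road_id_list lane_id_list)

-- ===== LEMMAS AND PROOFS =====

-- key of a triple
def pvK (t : Int × Int × List Int) : Int × Int := (t.1, t.2.1)

-- lexicographic order on keys (what Python's tuple comparison does)
def pvLex (c d : Int × Int) : Prop := c.1 < d.1 ∨ (c.1 = d.1 ∧ c.2 < d.2)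

-- the grid cells A sweeps, in A's order
def pvCells (rmin rmax lmin lmax : Int) : List (Int × Int) :=
  (PySem.List.pyRange rmin (rmax + 1) 1).flatMap (fun r =>
    (PySem.List.pyRange lmin (lmax + 1) 1).map (fun l => (r, l)))

-- sorted2's comparison function on triples
def pvBefore (a b : Int × Int × List Int) : Bool :=
  decide (a.1 < b.1) || (!decide (b.1 < a.1) && decide (a.2.1 < b.2.1))

theorem pvBefore_iff (a b : Int × Int × List Int) : pvBefore a b = true ↔ pvLex (pvK a) (pvK b) := by
  simp [pvBefore, pvLex, pvK]; omega

theorem pv_pyRange_pairwise (a b : Int) : (PySem.List.pyRange a b 1).Pairwise (· < ·) := by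
  rw [PySem.List.pyRange_of_pos a b (Int.zero_lt_one)]
  rw [List.pairwise_map]
  exact List.pairwise_lt_range.imp (by intro i j h; omega)

theorem pvCells_pairwise (rmin rmax lmin lmax : Int) :
    (pvCells rmin rmax lmin lmax).Pairwise pvLex := by
  unfold pvCells
  rw [List.pairwise_flatMap]
  constructor
  · intro r _
    rw [List.pairwise_map]
    exact (pv_pyRange_pairwise lmin (lmax + 1)).imp (by intro i j h; right; exact ⟨rfl, h⟩)
  · refine (pv_pyRange_pairwise rmin (rmax + 1)).imp ?_
    intro r1 r2 h x hx y hy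
    simp only [List.mem_map] at hx hy
    obtain ⟨l1, _, rfl⟩ := hx
    obtain ⟨l2, _, rfl⟩ := hy
    left; exact h

theorem pvLex_irrefl (c : Int × Int) : ¬ pvLex c c := by simp [pvLex]

-- inserting into A ++ B where everything in A is not-after x and everything in B is after x
theorem pv_insertBy_append (before : (Int × Int × List Int) → (Int × Int × List Int) → Bool)
    (x : Int × Int × List Int) (A B : List (Int × Int × List Int))
    (h1 : ∀ y ∈ A, before x y = false) (h2 : ∀ y ∈ B, before x y = true) :
    PySem.List.insertBy before x (A ++ B) = A ++ x :: B := by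
  induction A with
  | nil =>
    cases B with
    | nil => simp [PySem.List.insertBy]
    | cons b B' => simp [PySem.List.insertBy, h2 b (by simp)]
  | cons a A' ih =>
    have ha : before x a = false := h1 a (by simp)
    simp only [List.cons_append, PySem.List.insertBy, ha]
    simp only [Bool.false_eq_true, if_false]
    rw [ih (fun y hy => h1 y (by simp [hy]))]

-- a stable sort by key is the concatenation, over the key values in increasing order,
-- of the equal-key groups in input order
theorem pv_sorted_flat (cells : List (Int × Int)) (hpw : cells.Pairwise pvLex)
    (q : List (Int × Int × List Int)) (hq : ∀ t ∈ q, pvK t ∈ cells) :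
    PySem.List.sorted2 q (fun t => t.1) (fun t => t.2.1)
    = cells.flatMap (fun c => q.filter (fun t => pvK t == c)) := by
  induction q using List.reverseRecOn with
  | nil => simp [PySem.List.sorted2]
  | append_singleton q t ih =>
    have hsort : ∀ (p : List (Int × Int × List Int)),
        PySem.List.sorted2 p (fun t => t.1) (fun t => t.2.1)
        = p.foldl (fun acc x => PySem.List.insertBy pvBefore x acc) [] := by
      intro p; rfl
    rw [hsort, List.foldl_append, List.foldl_cons, List.foldl_nil, ← hsort]
    rw [ih (fun u hu => hq u (by simp [hu]))]
    obtain ⟨C1, C2, hcells⟩ := List.append_of_mem (hq t (by simp))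
    subst hcells
    rw [List.pairwise_append] at hpw
    obtain ⟨hC1, hC2cons, hcross⟩ := hpw
    rw [List.pairwise_cons] at hC2cons
    have hbefore1 : ∀ c ∈ C1, pvLex c (pvK t) := fun c hc => hcross c hc _ (by simp)
    have hbefore2 : ∀ c ∈ C2, pvLex (pvK t) c := hC2cons.1
    -- filters of q ++ [t]
    have hfe : ∀ c : Int × Int, (q ++ [t]).filter (fun u => pvK u == c)
        = q.filter (fun u => pvK u == c) ++ (if pvK t = c then [t] else []) := by
      intro c
      rw [List.filter_append, List.filter_singleton]
      by_cases h : pvK t = c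
      · simp [h]
      · have hb : (pvK t == c) = false := beq_eq_false_iff_ne.mpr h
        simp [hb, h]
    have hC1ne : ∀ c ∈ C1, ¬ (pvK t = c) := by
      intro c hc he; exact pvLex_irrefl (pvK t) (he ▸ hbefore1 c hc)
    have hC2ne : ∀ c ∈ C2, ¬ (pvK t = c) := by
      intro c hc he; exact pvLex_irrefl (pvK t) (he ▸ hbefore2 c hc)
    have h1 : C1.flatMap (fun c => (q ++ [t]).filter (fun u => pvK u == c))
        = C1.flatMap (fun c => q.filter (fun u => pvK u == c)) :=
      List.flatMap_congr (fun c hc => by rw [hfe c, if_neg (hC1ne c hc), List.append_nil])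
    have h2 : C2.flatMap (fun c => (q ++ [t]).filter (fun u => pvK u == c))
        = C2.flatMap (fun c => q.filter (fun u => pvK u == c)) :=
      List.flatMap_congr (fun c hc => by rw [hfe c, if_neg (hC2ne c hc), List.append_nil])
    rw [List.flatMap_append, List.flatMap_cons, List.flatMap_append, List.flatMap_cons]
    rw [h1, h2, hfe (pvK t), if_pos rfl]
    rw [← List.append_assoc]
    rw [pv_insertBy_append pvBefore t
        (C1.flatMap (fun c => q.filter (fun u => pvK u == c)) ++ q.filter (fun u => pvK u == pvK t))
        (C2.flatMap (fun c => q.filter (fun u => pvK u == c))) ?_ ?_]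
    · simp
    · intro y hy
      rw [List.mem_append] at hy
      have hky : pvLex (pvK y) (pvK t) ∨ pvK y = pvK t := by
        rcases hy with hy | hy
        · rw [List.mem_flatMap] at hy
          obtain ⟨c, hc, hyc⟩ := hy
          have := (List.mem_filter.mp hyc).2
          left; exact (beq_iff_eq.mp this) ▸ hbefore1 c hc
        · right; exact beq_iff_eq.mp (List.mem_filter.mp hy).2
      rw [Bool.eq_false_iff]
      intro hb
      have hlex := (pvBefore_iff t y).mp hb
      rcases hky with h | h
      · simp [pvLex, pvK] at hlex h; omega
      · exact pvLex_irrefl (pvK t) (h ▸ hlex)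
    · intro y hy
      rw [List.mem_flatMap] at hy
      obtain ⟨c, hc, hyc⟩ := hy
      have := beq_iff_eq.mp (List.mem_filter.mp hyc).2
      exact (pvBefore_iff t y).mpr (this ▸ hbefore2 c hc)

-- B's scan step
def pvStep (st : List (List Int) × Option (Int × Int) × Int) (t : Int × Int × List Int) :
    List (List Int) × Option (Int × Int) × Int :=
  if st.2.1 ≠ some (t.1, t.2.1) then
    (st.1 ++ [t.2.2 ++ [st.2.2 + 1]], some (t.1, t.2.1), st.2.2 + 1)
  else
    (st.1 ++ [t.2.2 ++ [st.2.2]], st.2.1, st.2.2)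

-- scanning a constant-key group with prev already equal to that key
theorem pvScan_const (g : List (Int × Int × List Int)) (c : Int × Int)
    (hg : ∀ t ∈ g, pvK t = c) (out : List (List Int)) (id : Int) :
    g.foldl pvStep (out, some c, id) = (out ++ g.map (fun t => t.2.2 ++ [id]), some c, id) := by
  induction g generalizing out with
  | nil => simp
  | cons t g' ih =>
    have hck : c = (t.1, t.2.1) := (hg t (by simp)).symm
    subst hck
    have hstep : pvStep (out, some (t.1, t.2.1), id) t
        = (out ++ [t.2.2 ++ [id]], some (t.1, t.2.1), id) := by
      simp [pvStep]
    rw [List.foldl_cons, hstep, ih (fun u hu => hg u (by simp [hu]))]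
    simp

-- scanning a nonempty constant-key group with a different prev: one id increment
theorem pvScan_group (g : List (Int × Int × List Int)) (c : Int × Int)
    (hg : ∀ t ∈ g, pvK t = c) (hne : g ≠ [])
    (out : List (List Int)) (prev : Option (Int × Int)) (id : Int) (hprev : prev ≠ some c) :
    g.foldl pvStep (out, prev, id)
    = (out ++ g.map (fun t => t.2.2 ++ [id + 1]), some c, id + 1) := by
  cases g with
  | nil => exact absurd rfl hne
  | cons t g' =>
    have hck : c = (t.1, t.2.1) := (hg t (by simp)).symm
    subst hck
    have h1 : pvStep (out, prev, id) t
        = (out ++ [t.2.2 ++ [id + 1]], some (t.1, t.2.1), id + 1) := by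
      simp [pvStep, hprev]
    rw [List.foldl_cons, h1,
      pvScan_const g' (t.1, t.2.1) (fun u hu => hg u (by simp [hu]))]
    simp

-- the per-cell fold B's scan amounts to (3-component state)
def pvCellStep (q : List (Int × Int × List Int))
    (st : List (List Int) × Option (Int × Int) × Int) (c : Int × Int) :
    List (List Int) × Option (Int × Int) × Int :=
  if q.filter (fun t => pvK t == c) = [] then st
  else (st.1 ++ (q.filter (fun t => pvK t == c)).map (fun t => t.2.2 ++ [st.2.2 + 1]), some c, st.2.2 + 1)

theorem pvScan_flat (cells : List (Int × Int)) (q : List (Int × Int × List Int))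
    (st : List (List Int) × Option (Int × Int) × Int)
    (hprev : ∀ c ∈ cells, st.2.1 ≠ some c) (hnd : cells.Pairwise (· ≠ ·)) :
    (cells.flatMap (fun c => q.filter (fun t => pvK t == c))).foldl pvStep st
    = cells.foldl (pvCellStep q) st := by
  induction cells generalizing st with
  | nil => simp
  | cons c cells' ih =>
    rw [List.flatMap_cons, List.foldl_append, List.foldl_cons]
    rw [List.pairwise_cons] at hnd
    by_cases hg : q.filter (fun t => pvK t == c) = []
    · rw [hg, List.foldl_nil]
      have hcs : pvCellStep q st c = st := by unfold pvCellStep; rw [if_pos hg]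
      rw [hcs, ih st (fun d hd => hprev d (by simp [hd])) hnd.2]
    · have hgk : ∀ t ∈ q.filter (fun t => pvK t == c), pvK t = c := by
        intro t ht; exact beq_iff_eq.mp (List.mem_filter.mp ht).2
      obtain ⟨o, p, i⟩ := st
      rw [pvScan_group _ c hgk hg o p i (hprev c (by simp))]
      have hcs : pvCellStep q (o, p, i) c
          = (o ++ (q.filter (fun t => pvK t == c)).map (fun t => t.2.2 ++ [i + 1]), some c, i + 1) := by
        unfold pvCellStep; rw [if_neg hg]
      rw [hcs, ih _ (fun d hd => by simpa using (hnd.1 d hd)) hnd.2]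

-- the id/output components of the 3-state cell fold, as a 2-state fold
def pvCellStep2 (q : List (Int × Int × List Int))
    (st : List (List Int) × Int) (c : Int × Int) : List (List Int) × Int :=
  if q.filter (fun t => pvK t == c) = [] then st
  else (st.1 ++ (q.filter (fun t => pvK t == c)).map (fun t => t.2.2 ++ [st.2 + 1]), st.2 + 1)

theorem pv_proj (cells : List (Int × Int)) (q : List (Int × Int × List Int))
    (out : List (List Int)) (prev : Option (Int × Int)) (id : Int) :
    (cells.foldl (pvCellStep q) (out, prev, id)).1
      = (cells.foldl (pvCellStep2 q) (out, id)).1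
    ∧ (cells.foldl (pvCellStep q) (out, prev, id)).2.2
      = (cells.foldl (pvCellStep2 q) (out, id)).2 := by
  induction cells generalizing out prev id with
  | nil => simp
  | cons c cells' ih =>
    rw [List.foldl_cons, List.foldl_cons]
    by_cases hg : q.filter (fun t => pvK t == c) = []
    · have h1 : pvCellStep q (out, prev, id) c = (out, prev, id) := by
        unfold pvCellStep; rw [if_pos hg]
      have h2 : pvCellStep2 q (out, id) c = (out, id) := by
        unfold pvCellStep2; rw [if_pos hg]
      rw [h1, h2]; exact ih out prev id
    · have h1 : pvCellStep q (out, prev, id) c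
        = (out ++ (q.filter (fun t => pvK t == c)).map (fun t => t.2.2 ++ [id + 1]), some c, id + 1) := by
        unfold pvCellStep; rw [if_neg hg]
      have h2 : pvCellStep2 q (out, id) c
        = (out ++ (q.filter (fun t => pvK t == c)).map (fun t => t.2.2 ++ [id + 1]), id + 1) := by
        unfold pvCellStep2; rw [if_neg hg]
      rw [h1, h2]; exact ih _ _ _

-- A's per-cell fold (appends the current id, then increments)
def pvCellStepA (wl : List (List Int)) (st : List (List Int) × Int) (c : Int × Int) :
    List (List Int) × Int :=
  if wl.filter (fun e => decide (PySem.List.pyGetD e 0 0 = c.1 ∧ PySem.List.pyGetD e 1 0 = c.2)) = [] then st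
  else (st.1 ++ (wl.filter (fun e => decide (PySem.List.pyGetD e 0 0 = c.1 ∧ PySem.List.pyGetD e 1 0 = c.2))).map (fun e => e ++ [st.2]), st.2 + 1)

-- A's cell step re-based to number from id+1 (matching B's 2-state fold)
def pvCellStepA' (wl : List (List Int)) (st : List (List Int) × Int) (c : Int × Int) :
    List (List Int) × Int :=
  if wl.filter (fun e => decide (PySem.List.pyGetD e 0 0 = c.1 ∧ PySem.List.pyGetD e 1 0 = c.2)) = [] then st
  else (st.1 ++ (wl.filter (fun e => decide (PySem.List.pyGetD e 0 0 = c.1 ∧ PySem.List.pyGetD e 1 0 = c.2))).map (fun e => e ++ [st.2 + 1]), st.2 + 1)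

-- shift: A numbers from the current id, B's 2-state fold from id+1
theorem pv_shift (cells : List (Int × Int)) (wl : List (List Int))
    (out : List (List Int)) (id : Int) :
    cells.foldl (pvCellStepA wl) (out, id + 1)
    = ((cells.foldl (pvCellStepA' wl) (out, id)).1,
       (cells.foldl (pvCellStepA' wl) (out, id)).2 + 1) := by
  induction cells generalizing out id with
  | nil => simp
  | cons c cells' ih =>
    rw [List.foldl_cons, List.foldl_cons]
    by_cases hg : wl.filter (fun e => decide (PySem.List.pyGetD e 0 0 = c.1 ∧ PySem.List.pyGetD e 1 0 = c.2)) = []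
    · have hA : pvCellStepA wl (out, id + 1) c = (out, id + 1) := by
        unfold pvCellStepA; rw [if_pos hg]
      have hB : pvCellStepA' wl (out, id) c = (out, id) := by
        unfold pvCellStepA'; rw [if_pos hg]
      rw [hA, hB]
      exact ih out id
    · have hA : pvCellStepA wl (out, id + 1) c
          = (out ++ (wl.filter (fun e => decide (PySem.List.pyGetD e 0 0 = c.1 ∧ PySem.List.pyGetD e 1 0 = c.2))).map (fun e => e ++ [id + 1]), id + 1 + 1) := by
        unfold pvCellStepA; rw [if_neg hg]
      have hB : pvCellStepA' wl (out, id) c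
          = (out ++ (wl.filter (fun e => decide (PySem.List.pyGetD e 0 0 = c.1 ∧ PySem.List.pyGetD e 1 0 = c.2))).map (fun e => e ++ [id + 1]), id + 1) := by
        unfold pvCellStepA'; rw [if_neg hg]
      rw [hA, hB]
      exact ih _ _

-- A's inner scan over waypoints_list computed from the filtered group.
theorem pv_inner_scan (waypoints_list : List (List Int)) (road_id lane_id idv : Int)
    (z : Int) (s : List (List Int)) :
    waypoints_list.foldl (fun (r : Int × List (List Int)) element =>
        if PySem.List.pyGetD element 0 0 = road_id ∧ PySem.List.pyGetD element 1 0 = lane_id then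
          (1, r.2 ++ [element ++ [idv]])
        else r) (z, s)
    = (if waypoints_list.filter (fun e => decide (PySem.List.pyGetD e 0 0 = road_id ∧ PySem.List.pyGetD e 1 0 = lane_id)) = [] then z else 1,
       s ++ (waypoints_list.filter (fun e => decide (PySem.List.pyGetD e 0 0 = road_id ∧ PySem.List.pyGetD e 1 0 = lane_id))).map (· ++ [idv])) := by
  induction waypoints_list generalizing z s with
  | nil => simp
  | cons e t ih =>
    by_cases h : PySem.List.pyGetD e 0 0 = road_id ∧ PySem.List.pyGetD e 1 0 = lane_id
    · simp only [List.foldl_cons, if_pos h, List.filter_cons, decide_eq_true h]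
      rw [ih]
      simp
    · have hd : (decide (PySem.List.pyGetD e 0 0 = road_id ∧ PySem.List.pyGetD e 1 0 = lane_id)) = false := decide_eq_false h
      simp only [List.foldl_cons, if_neg h, List.filter_cons, hd, Bool.false_eq_true, if_false]
      rw [ih]

-- the filtered, keyed list B sorts, expressed through wl's filters on an in-range cell
theorem pv_filter_bridge (wl : List (List Int)) (rmin rmax lmin lmax : Int) (c : Int × Int)
    (hc : rmin ≤ c.1 ∧ c.1 ≤ rmax ∧ lmin ≤ c.2 ∧ c.2 ≤ lmax) :
    ((wl.map pvTriple).filter (fun t => decide (rmin ≤ t.1 ∧ t.1 ≤ rmax ∧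
        lmin ≤ t.2.1 ∧ t.2.1 ≤ lmax))).filter (fun t => pvK t == c)
    = (wl.filter (fun e => decide (PySem.List.pyGetD e 0 0 = c.1 ∧ PySem.List.pyGetD e 1 0 = c.2))).map pvTriple := by
  rw [List.filter_filter, List.filter_map]
  congr 1
  apply List.filter_congr
  intro e _
  simp only [Function.comp, pvTriple, pvK]
  by_cases h : PySem.List.pyGetD e 0 0 = c.1 ∧ PySem.List.pyGetD e 1 0 = c.2
  · obtain ⟨h0, h1⟩ := h
    simp [h0, h1, hc.1, hc.2.1, hc.2.2.1, hc.2.2.2]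
  · have hd : (decide (PySem.List.pyGetD e 0 0 = c.1 ∧ PySem.List.pyGetD e 1 0 = c.2)) = false := decide_eq_false h
    rw [hd]
    simp only [Bool.and_eq_false_iff, beq_eq_false_iff_ne, ne_eq, Prod.ext_iff]
    tauto

-- cell membership gives the range bounds
theorem pv_mem_cells {rmin rmax lmin lmax : Int} {c : Int × Int}
    (hc : c ∈ pvCells rmin rmax lmin lmax) :
    rmin ≤ c.1 ∧ c.1 ≤ rmax ∧ lmin ≤ c.2 ∧ c.2 ≤ lmax := by
  unfold pvCells at hc
  rw [List.mem_flatMap] at hc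
  obtain ⟨r, hr, hc⟩ := hc
  rw [List.mem_map] at hc
  obtain ⟨l, hl, rfl⟩ := hc
  rw [PySem.List.mem_pyRange_one] at hr hl
  exact ⟨hr.1, by omega, hl.1, by omega⟩

-- the key of every in-range waypoint is one of the cells
theorem pv_key_mem_cells {rmin rmax lmin lmax : Int} {t : Int × Int × List Int}
    (h : rmin ≤ t.1 ∧ t.1 ≤ rmax ∧ lmin ≤ t.2.1 ∧ t.2.1 ≤ lmax) :
    pvK t ∈ pvCells rmin rmax lmin lmax := by
  unfold pvCells
  rw [List.mem_flatMap]
  exact ⟨t.1, PySem.List.mem_pyRange_one.mpr ⟨h.1, by omega⟩,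
    List.mem_map.mpr ⟨t.2.1, PySem.List.mem_pyRange_one.mpr ⟨h.2.2.1, by omega⟩, rfl⟩⟩

-- on an in-range cell, B's per-cell step over the keyed list is A's re-based step over wl
theorem pv_cell_bridge (wl : List (List Int)) (rmin rmax lmin lmax : Int)
    (st : List (List Int) × Int) (c : Int × Int)
    (hc : c ∈ pvCells rmin rmax lmin lmax) :
    pvCellStep2 ((wl.map pvTriple).filter (fun t => decide (rmin ≤ t.1 ∧ t.1 ≤ rmax ∧
        lmin ≤ t.2.1 ∧ t.2.1 ≤ lmax))) st c = pvCellStepA' wl st c := by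
  have hb := pv_filter_bridge wl rmin rmax lmin lmax c (pv_mem_cells hc)
  unfold pvCellStep2 pvCellStepA'
  rw [hb]
  by_cases hg : wl.filter (fun e => decide (PySem.List.pyGetD e 0 0 = c.1 ∧ PySem.List.pyGetD e 1 0 = c.2)) = []
  · rw [hg]; simp
  · rw [if_neg (by simpa [List.map_eq_nil_iff] using hg), if_neg hg, List.map_map]
    rfl

-- ===== VERDICT (by name: the statement is the Claim_ definition above) =====
theorem sort_waypoints_spec : Claim_equal_sort_waypoints := by
  intro wl rl ll _hDom _hPre
  unfold Spec_sort_waypoints sort_waypoints sort_waypoints_alt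
  simp only []
  generalize (PySem.List.min? rl (fun x => x)).getD 0 = rmin
  generalize (PySem.List.max? rl (fun x => x)).getD 0 = rmax
  generalize (PySem.List.min? ll (fun x => x)).getD 0 = lmin
  generalize (PySem.List.max? ll (fun x => x)).getD 0 = lmax
  -- ===== A side: the inner lane loop is A's per-cell step =====
  have hinner : ∀ road_id : Int,
      (fun (st : List (List Int) × Int) (lane_id : Int) =>
        let r := wl.foldl (fun (r : Int × List (List Int)) element =>
          if PySem.List.pyGetD element 0 0 = road_id ∧ PySem.List.pyGetD element 1 0 = lane_id then
            (1, r.2 ++ [element ++ [st.2]])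
          else r) (0, st.1)
        if r.1 = 1 then (r.2, st.2 + 1) else (r.2, st.2))
      = fun st lane_id => pvCellStepA wl st (road_id, lane_id) := by
    intro road_id
    funext st lane_id
    simp only []
    rw [pv_inner_scan]
    unfold pvCellStepA
    simp only []
    by_cases hg : wl.filter (fun e => decide (PySem.List.pyGetD e 0 0 = road_id ∧ PySem.List.pyGetD e 1 0 = lane_id)) = []
    · rw [if_pos hg, hg]
      simp
    · rw [if_neg hg, if_neg hg]
      simp
  have hA : ((PySem.List.pyRange rmin (rmax + 1) 1).foldl (fun st road_id =>
        (PySem.List.pyRange lmin (lmax + 1) 1).foldl (fun st lane_id =>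
          let r := wl.foldl (fun (r : Int × List (List Int)) element =>
            if PySem.List.pyGetD element 0 0 = road_id ∧ PySem.List.pyGetD element 1 0 = lane_id then
              (1, r.2 ++ [element ++ [st.2]])
            else r) (0, st.1)
          if r.1 = 1 then (r.2, st.2 + 1) else (r.2, st.2)) st)
        (([] : List (List Int)), (1 : Int)))
      = (pvCells rmin rmax lmin lmax).foldl (pvCellStepA wl) ([], 1) := by
    unfold pvCells
    rw [List.foldl_flatMap]
    apply PySem.List.foldl_congr_mem
    intro acc road_id _
    rw [hinner road_id, List.foldl_map]
  rw [hA]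
  -- shift A's numbering to start the per-cell fold at 0
  have h0 : (([] : List (List Int)), (1 : Int)) = ([], (0 : Int) + 1) := by norm_num
  rw [h0, pv_shift]
  -- ===== B side =====
  have hq : ∀ t ∈ (wl.map pvTriple).filter (fun t => decide (rmin ≤ t.1 ∧ t.1 ≤ rmax ∧
      lmin ≤ t.2.1 ∧ t.2.1 ≤ lmax)), pvK t ∈ pvCells rmin rmax lmin lmax := by
    intro t ht
    exact pv_key_mem_cells (of_decide_eq_true (List.mem_filter.mp ht).2)
  rw [pv_sorted_flat (pvCells rmin rmax lmin lmax) (pvCells_pairwise rmin rmax lmin lmax) _ hq]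
  have hstep : (fun (st : List (List Int) × Option (Int × Int) × Int) (t : Int × Int × List Int) =>
      if st.2.1 ≠ some (t.1, t.2.1) then
        (st.1 ++ [t.2.2 ++ [st.2.2 + 1]], some (t.1, t.2.1), st.2.2 + 1)
      else
        (st.1 ++ [t.2.2 ++ [st.2.2]], st.2.1, st.2.2)) = pvStep := rfl
  rw [hstep]
  rw [pvScan_flat _ _ _ (by intro c _; simp)
    ((pvCells_pairwise rmin rmax lmin lmax).imp (fun h => by
      intro he; subst he; exact pvLex_irrefl _ h))]
  rw [(pv_proj (pvCells rmin rmax lmin lmax) _ [] none 0).1]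
  -- ===== bridge the two per-cell folds =====
  have hbr : (pvCells rmin rmax lmin lmax).foldl
      (pvCellStep2 ((wl.map pvTriple).filter (fun t => decide (rmin ≤ t.1 ∧ t.1 ≤ rmax ∧
        lmin ≤ t.2.1 ∧ t.2.1 ≤ lmax)))) ([], 0)
      = (pvCells rmin rmax lmin lmax).foldl (pvCellStepA' wl) ([], 0) := by
    apply PySem.List.foldl_congr_mem
    intro st c hc
    exact pv_cell_bridge wl rmin rmax lmin lmax st c hc
  rw [hbr]
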